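-- pv_equiv track=rewrite | github.com/Mattia9727/AMOD_BB | branch_and_bound.py | is_new_problem_feasible
-- ===== SOURCE A (Python) =====
-- def is_new_problem_feasible(prob, i, v):
--     job_in_constr = []
--     for prec in v:
--         if i == prec[1]:
--             job_in_constr.append(prec[0])
--
--     if not job_in_constr:
--         return 0
--     else:
--         for j in prob:
--             if j in job_in_constr:
--                 job_in_constr.remove(j)
--         if job_in_constr:
--             return 1
--         return 0
-- ===== SOURCE B (Python) =====
-- def is_new_problem_feasible(prob, i, v):
--     remaining = {}
--     for j in prob:
--         remaining[j] = remaining.get(j, 0) + 1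
--     for prec in v:
--         if prec[1] == i:
--             n = remaining.get(prec[0], 0)
--             if n > 0:
--                 remaining[prec[0]] = n - 1
--             else:
--                 return 1
--     return 0
-- ===== Notes on version B (the rewrite author's own statement) =====
-- stated objective: alternative
-- what changed: B builds a count table of prob once and makes a single pass over v, consuming one count per predecessor of i and returning 1 immediately when a predecessor's count is exhausted, instead of A's collect-then-remove two-phase scan with list.remove.
import Mathlib
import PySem

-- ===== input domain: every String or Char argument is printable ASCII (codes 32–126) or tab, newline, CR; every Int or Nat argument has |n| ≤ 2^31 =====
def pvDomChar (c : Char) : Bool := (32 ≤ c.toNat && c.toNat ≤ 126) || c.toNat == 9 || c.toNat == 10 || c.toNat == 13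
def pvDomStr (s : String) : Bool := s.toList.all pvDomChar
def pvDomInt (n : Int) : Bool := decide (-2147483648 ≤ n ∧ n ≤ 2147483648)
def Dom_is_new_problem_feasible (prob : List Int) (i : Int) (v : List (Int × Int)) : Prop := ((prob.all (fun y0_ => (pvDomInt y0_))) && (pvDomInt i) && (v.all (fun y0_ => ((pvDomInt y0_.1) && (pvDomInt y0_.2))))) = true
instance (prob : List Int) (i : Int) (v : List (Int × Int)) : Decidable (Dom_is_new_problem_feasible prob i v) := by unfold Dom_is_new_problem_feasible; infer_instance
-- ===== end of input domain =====

-- B replaces A's collect-then-remove two-phase scan by a count table of prob plus a single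
-- early-exit pass over v (alternative decomposition, not claimed faster on the timed sizes).

-- ===== PORT A =====
def is_new_problem_feasible (prob : List Int) (i : Int) (v : List (Int × Int)) : Int :=
  let job_in_constr : List Int :=
    v.foldl (fun acc prec => if i == prec.2 then acc ++ [prec.1] else acc) []
  if job_in_constr = [] then 0
  else
    let job_in_constr :=
      prob.foldl
        (fun acc j => if acc.contains j then ((PySem.List.remove? acc j).getD acc) else acc)
        job_in_constr
    if job_in_constr ≠ [] then 1 else 0

-- ===== PORT B =====
-- the early-returning loop over v: walks v with the remaining-count dict
def feasGo (i : Int) : List (Int × Int) → PySem.Dict Int Int → Int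
  | [], _ => 0
  | prec :: rest, remaining =>
    if prec.2 == i then
      let n := remaining.getD prec.1 0
      if 0 < n then feasGo i rest (remaining.insert prec.1 (n - 1))
      else 1
    else feasGo i rest remaining

def is_new_problem_feasible_alt (prob : List Int) (i : Int) (v : List (Int × Int)) : Int :=
  let remaining : PySem.Dict Int Int :=
    prob.foldl (fun d j => d.insert j (d.getD j 0 + 1)) PySem.Dict.empty
  feasGo i v remaining

-- ===== PRECONDITION & SPEC =====
def Spec_is_new_problem_feasible (prob : List Int) (i : Int) (v : List (Int × Int)) (out : Int) : Prop := out = is_new_problem_feasible_alt prob i v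
instance (prob : List Int) (i : Int) (v : List (Int × Int)) (out : Int) : Decidable (Spec_is_new_problem_feasible prob i v out) := by unfold Spec_is_new_problem_feasible; infer_instance

-- ===== CLAIM (what is proved, stated in full; the proofs are below) =====
def Claim_equal_is_new_problem_feasible : Prop := ∀ (prob : List Int) (i : Int) (v : List (Int × Int)), Dom_is_new_problem_feasible prob i v → Spec_is_new_problem_feasible prob i v (is_new_problem_feasible prob i v)

-- ===== LEMMAS AND PROOFS =====

-- the multiset of predecessors of i listed in v
def predL (i : Int) (v : List (Int × Int)) : List Int :=
  (v.filter (fun prec => i == prec.2)).map Prod.fst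

-- B's loop returns 0 iff every predecessor multiplicity is covered by the dict's counts
theorem feasGo_eq_zero_iff (i : Int) :
    ∀ (v : List (Int × Int)) (d : PySem.Dict Int Int),
      (∀ x, 0 ≤ d.getD x 0) →
      (feasGo i v d = 0 ↔ ∀ x, ((predL i v).count x : Int) ≤ d.getD x 0) := by
  intro v
  induction v with
  | nil =>
    intro d hd
    simp [feasGo, predL]
    intro x; exact hd x
  | cons prec rest ih =>
    intro d hd
    by_cases h : prec.2 = i
    · have hb : (prec.2 == i) = true := by simp [h]
      have hc : predL i (prec :: rest) = prec.1 :: predL i rest := by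
        simp [predL, h]
      by_cases hn : 0 < d.getD prec.1 0
      · have hd' : ∀ x, 0 ≤ (d.insert prec.1 (d.getD prec.1 0 - 1)).getD x 0 := by
          intro x
          rw [PySem.Dict.getD_insert]
          split_ifs with hx
          · omega
          · exact hd x
        have hIH := ih (d.insert prec.1 (d.getD prec.1 0 - 1)) hd'
        simp only [feasGo, hb, if_true, if_pos hn, hIH, hc]
        constructor
        · intro hall x
          have hx := hall x
          rw [PySem.Dict.getD_insert] at hx
          by_cases hxa : x = prec.1
          · subst hxa
            rw [if_pos rfl] at hx
            rw [List.count_cons_self]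
            push_cast
            omega
          · rw [if_neg hxa] at hx
            have hbx : (prec.1 == x) = false := by
              simp only [beq_eq_false_iff_ne, ne_eq]
              exact fun hh => hxa hh.symm
            rw [List.count_cons, hbx]
            simp only [if_false, Bool.false_eq_true]
            push_cast
            omega
        · intro hall x
          rw [PySem.Dict.getD_insert]
          by_cases hxa : x = prec.1
          · subst hxa
            rw [if_pos rfl]
            have hx := hall prec.1
            rw [List.count_cons_self] at hx
            push_cast at hx
            omega
          · rw [if_neg hxa]
            have hx := hall x
            have hbx : (prec.1 == x) = false := by
              simp only [beq_eq_false_iff_ne, ne_eq]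
              exact fun hh => hxa hh.symm
            rw [List.count_cons, hbx] at hx
            simp only [if_false, Bool.false_eq_true] at hx
            push_cast at hx
            omega
      · -- count exhausted: loop returns 1
        simp only [feasGo, hb, if_true, if_neg hn]
        constructor
        · intro h1
          exact absurd h1 one_ne_zero
        · intro hall
          exfalso
          have hx := hall prec.1
          rw [hc, List.count_cons_self] at hx
          push_cast at hx
          omega
    · have hb : (prec.2 == i) = false := by simp [h]
      have hib : (i == prec.2) = false := by
        simp only [beq_eq_false_iff_ne, ne_eq]
        exact fun hh => h hh.symm
      have hc : predL i (prec :: rest) = predL i rest := by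
        simp [predL, hib]
      simp only [feasGo, hb, Bool.false_eq_true, if_false, hc]
      exact ih d hd

-- B's loop only ever returns 0 or 1
theorem feasGo_zero_or_one (i : Int) :
    ∀ (v : List (Int × Int)) (d : PySem.Dict Int Int),
      feasGo i v d = 0 ∨ feasGo i v d = 1 := by
  intro v
  induction v with
  | nil => intro d; left; rfl
  | cons prec rest ih =>
    intro d
    by_cases h : (prec.2 == i) = true
    · by_cases hn : 0 < d.getD prec.1 0
      · simpa [feasGo, h, hn] using ih (d.insert prec.1 (d.getD prec.1 0 - 1))
      · right; simp [feasGo, h, hn]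
    · simpa [feasGo, h] using ih d

-- A's removal fold empties the list iff every multiplicity is covered by prob
theorem removeFold_eq_nil_iff :
    ∀ (prob L : List Int),
      (prob.foldl
        (fun acc j => if acc.contains j then ((PySem.List.remove? acc j).getD acc) else acc)
        L) = [] ↔ ∀ x, L.count x ≤ prob.count x := by
  intro prob
  induction prob with
  | nil =>
    intro L
    simp only [List.foldl_nil, List.count_nil, Nat.le_zero]
    constructor
    · intro h; subst h; simp
    · intro h
      cases L with
      | nil => rfl
      | cons a t => exact absurd (h a) (by simp [List.count_cons_self])
  | cons j prob ih =>
    intro L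
    rw [List.foldl_cons]
    by_cases hj : L.contains j
    · have hmem : j ∈ L := by simpa using hj
      have hrem : PySem.List.remove? L j = some (L.erase j) :=
        PySem.List.remove?_eq_some_erase L j hmem
      rw [if_pos hj, hrem]
      simp only [Option.getD_some]
      rw [ih]
      constructor
      · intro hall x
        have hx := hall x
        rw [List.count_cons]
        by_cases hxj : x = j
        · subst hxj
          rw [List.count_erase_self] at hx
          have hpos : 0 < L.count x := List.count_pos_iff.mpr hmem
          simp; omega
        · rw [List.count_erase_of_ne hxj] at hx
          have hbx : (j == x) = false := by
            simp only [beq_eq_false_iff_ne, ne_eq]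
            exact fun hh => hxj hh.symm
          rw [hbx]
          simp only [if_false, Bool.false_eq_true]
          omega
      · intro hall x
        have hx := hall x
        rw [List.count_cons] at hx
        by_cases hxj : x = j
        · subst hxj
          rw [List.count_erase_self]
          have hpos : 0 < L.count x := List.count_pos_iff.mpr hmem
          simp at hx; omega
        · rw [List.count_erase_of_ne hxj]
          have hbx : (j == x) = false := by
            simp only [beq_eq_false_iff_ne, ne_eq]
            exact fun hh => hxj hh.symm
          rw [hbx] at hx
          simp only [if_false, Bool.false_eq_true] at hx
          omega
    · rw [if_neg hj, ih]
      have hnot : L.count j = 0 := by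
        rw [List.count_eq_zero]
        simpa using hj
      constructor
      · intro hall x
        have hx := hall x
        rw [List.count_cons]
        simp only [beq_iff_eq]
        split_ifs <;> omega
      · intro hall x
        have hx := hall x
        by_cases hxj : x = j
        · subst hxj; omega
        · rw [List.count_cons] at hx
          have hbx : (j == x) = false := by
            simp only [beq_eq_false_iff_ne, ne_eq]
            exact fun hh => hxj hh.symm
          rw [hbx] at hx
          simp only [if_false, Bool.false_eq_true] at hx
          omega

-- the counts in B's dict are exactly the counts of prob
theorem remaining_getD (prob : List Int) (x : Int) :
    (prob.foldl (fun d j => d.insert j (d.getD j 0 + 1)) PySem.Dict.empty).getD x 0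
      = (prob.count x : Int) := by
  rw [PySem.Dict.foldl_insert_getD_add_one_eq_counter]
  exact PySem.Dict.getD_counter prob x

theorem main_eq (prob : List Int) (i : Int) (v : List (Int × Int)) :
    is_new_problem_feasible prob i v = is_new_problem_feasible_alt prob i v := by
  unfold is_new_problem_feasible is_new_problem_feasible_alt
  have hjic : v.foldl (fun acc prec => if i == prec.2 then acc ++ [prec.1] else acc) []
      = predL i v := by
    simpa [predL] using
      PySem.List.foldl_append_if (l := v) (acc := ([] : List Int))
        (p := fun prec => i == prec.2) (f := Prod.fst)
  have hnn : ∀ x : Int, (0:Int) ≤ (prob.foldl (fun d j => d.insert j (d.getD j 0 + 1))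
      PySem.Dict.empty).getD x 0 := by
    intro x
    rw [remaining_getD prob x]
    positivity
  have hiff := feasGo_eq_zero_iff i v
      (prob.foldl (fun d j => d.insert j (d.getD j 0 + 1)) PySem.Dict.empty) hnn
  have hcov : (∀ x, ((predL i v).count x : Int) ≤ (prob.foldl
        (fun d j => d.insert j (d.getD j 0 + 1)) PySem.Dict.empty).getD x 0)
      ↔ (∀ x, (predL i v).count x ≤ prob.count x) := by
    constructor
    · intro h x; have := h x; rw [remaining_getD] at this; exact_mod_cast this
    · intro h x; rw [remaining_getD]; exact_mod_cast h x
  rw [hjic]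
  by_cases hnil : predL i v = []
  · rw [if_pos hnil]
    have : feasGo i v (prob.foldl (fun d j => d.insert j (d.getD j 0 + 1))
        PySem.Dict.empty) = 0 := by
      rw [hiff]
      intro x
      rw [hnil]
      simp [hnn x]
    simp only [this]
  · rw [if_neg hnil]
    by_cases hle : ∀ x, (predL i v).count x ≤ prob.count x
    · have hfold : (prob.foldl
          (fun acc j => if acc.contains j then ((PySem.List.remove? acc j).getD acc) else acc)
          (predL i v)) = [] := (removeFold_eq_nil_iff prob (predL i v)).mpr hle
      have hB : feasGo i v (prob.foldl (fun d j => d.insert j (d.getD j 0 + 1))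
          PySem.Dict.empty) = 0 := by rw [hiff]; exact hcov.mpr hle
      rw [hfold, hB]
      simp
    · have hfold : (prob.foldl
          (fun acc j => if acc.contains j then ((PySem.List.remove? acc j).getD acc) else acc)
          (predL i v)) ≠ [] := by
        intro hc; exact hle ((removeFold_eq_nil_iff prob (predL i v)).mp hc)
      have hB : feasGo i v (prob.foldl (fun d j => d.insert j (d.getD j 0 + 1))
          PySem.Dict.empty) ≠ 0 := by
        intro hc
        rw [hiff] at hc
        exact hle (hcov.mp hc)
      have hB1 : feasGo i v (prob.foldl (fun d j => d.insert j (d.getD j 0 + 1))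
          PySem.Dict.empty) = 1 := by
        rcases feasGo_zero_or_one i v (prob.foldl (fun d j => d.insert j (d.getD j 0 + 1))
          PySem.Dict.empty) with h0 | h1
        · exact absurd h0 hB
        · exact h1
      rw [if_pos hfold, hB1]

-- ===== VERDICT (by name: the statement is the Claim_ definition above) =====
theorem is_new_problem_feasible_spec : Claim_equal_is_new_problem_feasible := by
  intro prob i v _
  unfold Spec_is_new_problem_feasible
  exact main_eq prob i v
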